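-- pv_equiv track=rewrite | github.com/linstald/master-thesis-scripts | Necklace/necklace.py | getTypeIndex
-- ===== SOURCE A (Python) =====
-- def getTypeIndex(neckl):
--     """
--     Given a necklace, returns a dictionary mapping each type (read: letter) to its index as it appears
--     in order of the necklace. This index determines the order of the colours within the necklace.
--
--     #### Args:
--     `neckl` a list (or string) representing a necklace string.
--
--     #### Returns:
--     a dictionary having the letters of `neckl` as keys and mapping to `int`
--     """
--     nextIndex = 0
--     typeIndex = {}
--     for c in neckl:
--         if c not in typeIndex:
--             typeIndex[c] = nextIndex
--             nextIndex += 1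
--     return typeIndex
-- ===== SOURCE B (Python) =====
-- def getTypeIndex(neckl):
--     """Backward overwrite pass records each letter's FIRST occurrence index
--     (later, i.e. smaller-i, writes win); sorting the letters by that index
--     yields first-appearance order; enumerate assigns the ranks."""
--     seq = list(neckl)
--     first = {}
--     for i in range(len(seq) - 1, -1, -1):
--         first[seq[i]] = i
--     order = sorted(first, key=lambda c: first[c])
--     return {c: i for i, c in enumerate(order)}
-- ===== Notes on version B (the rewrite author's own statement) =====
-- stated objective: alternative
-- what changed: Replaces A's forward single pass with a seen-dict membership test and running counter by a backward overwrite pass that records each letter's first-occurrence index, followed by sorting the letters by that index and enumerating them; no membership test and no counter.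
import Mathlib
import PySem

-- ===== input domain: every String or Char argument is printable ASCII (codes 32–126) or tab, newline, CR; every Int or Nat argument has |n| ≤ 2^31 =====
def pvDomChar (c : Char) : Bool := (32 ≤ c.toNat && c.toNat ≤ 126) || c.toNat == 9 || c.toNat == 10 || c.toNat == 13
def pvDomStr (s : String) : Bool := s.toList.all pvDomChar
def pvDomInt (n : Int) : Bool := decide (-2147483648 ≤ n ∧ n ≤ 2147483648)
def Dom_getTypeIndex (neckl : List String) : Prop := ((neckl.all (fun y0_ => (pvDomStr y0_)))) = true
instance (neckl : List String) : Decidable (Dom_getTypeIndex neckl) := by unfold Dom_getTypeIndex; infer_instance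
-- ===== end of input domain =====

-- B is an alternative algorithm (backward overwrite pass recording first-occurrence
-- indices, then sort the letters by that index) for A's forward seen-dict-and-counter
-- loop; same values on all inputs.

-- ===== PORT A =====
-- A: single pass, running counter nextIndex and dict typeIndex; insert on first sight.
def getTypeIndex (neckl : List String) : List (String × Int) :=
  (neckl.foldl
    (fun (st : Int × PySem.Dict String Int) c =>
      if st.2.contains c then st else (st.1 + 1, st.2.insert c st.1))
    (0, PySem.Dict.empty)).2.items

-- ===== PORT B =====
-- B: for i in range(len(seq)-1, -1, -1): first[seq[i]] = i; then order = sorted(first,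
-- key=lambda c: first[c]); then {c: i for i, c in enumerate(order)} (distinct keys, so
-- the comprehension's items are the enumerated pairs).
-- seq[i] has 0 ≤ i < len, so pyGetD with a default is exact; first[c] is looked up only
-- for c ∈ first.keys, so first.getD c 0 is exact (no KeyError is reachable).
def getTypeIndex_alt (neckl : List String) : List (String × Int) :=
  let first := (PySem.List.pyRange (PySem.List.len neckl - 1) (-1) (-1)).foldl
      (fun (d : PySem.Dict String Int) i => d.insert (PySem.List.pyGetD neckl i "") i)
      PySem.Dict.empty
  let order := PySem.List.sorted first.keys (fun c => first.getD c 0)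
  (PySem.List.enumerate order 0).map (fun p => (p.2, p.1))

-- ===== PRECONDITION & SPEC =====
def Spec_getTypeIndex (neckl : List String) (out : List (String × Int)) : Prop := out = getTypeIndex_alt neckl
instance (neckl : List String) (out : List (String × Int)) : Decidable (Spec_getTypeIndex neckl out) := by unfold Spec_getTypeIndex; infer_instance

-- ===== CLAIM (what is proved, stated in full; the proofs are below) =====
def Claim_equal_getTypeIndex : Prop := ∀ (neckl : List String), Dom_getTypeIndex neckl → Spec_getTypeIndex neckl (getTypeIndex neckl)

-- ===== LEMMAS AND PROOFS =====

-- ---------- A side: the seen-dict loop builds letter ↦ first-appearance rank ----------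

-- The dict whose items are the enumerated list s (letter ↦ index).
def pvD (s : List String) : PySem.Dict String Int :=
  PySem.Dict.mk ((PySem.List.enumerate s 0).map (fun p => (p.2, p.1)))

theorem pvD_keys (s : List String) : (pvD s).keys = s := by
  simp only [pvD, PySem.Dict.keys, List.map_map, Function.comp_def]
  exact PySem.List.map_snd_enumerate s 0

theorem pvD_contains (s : List String) (c : String) :
    (pvD s).contains c = decide (c ∈ s) := by
  rw [PySem.Dict.contains_eq_decide_mem_keys, pvD_keys]

theorem pvD_snoc (s : List String) (c : String) (h : c ∉ s) :
    (pvD s).insert c (s.length : Int) = pvD (s ++ [c]) := by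
  apply PySem.Dict.ext
  rw [PySem.Dict.items_insert_of_not_contains]
  · simp [pvD, PySem.List.enumerate_append,
      PySem.List.enumerate_cons, PySem.List.enumerate_nil]
  · rw [pvD_contains]; simpa using h

-- A's loop, started from an arbitrary already-seen set s, lands on Set.update s xs.
theorem pvMain (xs : List String) (s : PySem.Set String) :
    xs.foldl
      (fun (st : Int × PySem.Dict String Int) c =>
        if st.2.contains c then st else (st.1 + 1, st.2.insert c st.1))
      ((s.length : Int), pvD s)
    = (((PySem.Set.update s xs).length : Int), pvD (PySem.Set.update s xs)) := by
  induction xs generalizing s with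
  | nil => simp [PySem.Set.update]
  | cons c xs ih =>
    by_cases hc : c ∈ s
    · have : PySem.Set.add s c = s := by simp [PySem.Set.add, PySem.Set.contains, hc]
      simp only [List.foldl_cons, pvD_contains, hc, decide_true, if_true,
        PySem.Set.update, List.foldl_cons, this]
      exact ih s
    · have hadd : PySem.Set.add s c = s ++ [c] := by
        simp [PySem.Set.add, PySem.Set.contains, hc]
      simp only [List.foldl_cons, pvD_contains, hc, decide_false,
        PySem.Set.update, List.foldl_cons, hadd]
      have := ih (s ++ [c])
      rw [pvD_snoc s c hc] at *
      simpa [PySem.Set.update] using this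

-- ---------- B side: the backward loop, its keys and values ----------

-- The backward index loop, rewritten as a foldr over the enumerated list
-- (head inserted last, so the FIRST occurrence's index wins).
def pvFirst (neckl : List String) : PySem.Dict String Int :=
  (PySem.List.enumerate neckl 0).foldr (fun p d => d.insert p.2 p.1) PySem.Dict.empty

theorem pvLoop_eq (neckl : List String) :
    (PySem.List.pyRange (PySem.List.len neckl - 1) (-1) (-1)).foldl
      (fun (d : PySem.Dict String Int) i => d.insert (PySem.List.pyGetD neckl i "") i)
      PySem.Dict.empty
    = pvFirst neckl := by
  have h1 : PySem.List.pyRange (PySem.List.len neckl - 1) (-1) (-1)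
      = (PySem.List.pyRange 0 (PySem.List.len neckl) 1).reverse := by
    rw [PySem.List.pyRange_neg_one_eq_reverse]; norm_num
  rw [h1, List.foldl_reverse, pvFirst,
    PySem.List.enumerate_eq_map_pyRange neckl "", List.foldr_map]

theorem pvFirst_eq_foldl (neckl : List String) :
    pvFirst neckl
      = ((PySem.List.enumerate neckl 0).reverse).foldl
          (fun d (p : Int × String) => d.insert p.2 p.1) PySem.Dict.empty := by
  rw [List.foldl_reverse, pvFirst]

theorem pvFirst_keys (neckl : List String) :
    (pvFirst neckl).keys = PySem.Set.ofList neckl.reverse := by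
  rw [pvFirst_eq_foldl,
    PySem.Dict.keys_foldl_insert_key _ (fun (p : Int × String) => p.2) (fun _ p => p.1)]
  have : ((PySem.List.enumerate neckl 0).reverse).map (fun (p : Int × String) => p.2)
      = neckl.reverse := by
    rw [List.map_reverse, PySem.List.map_snd_enumerate]
  rw [this]
  simp [PySem.Set.ofList_eq_foldl, PySem.Set.update, PySem.Dict.keys]
  rfl

theorem pvFirst_keys_nodup (neckl : List String) : (pvFirst neckl).keys.Nodup := by
  rw [pvFirst_keys]; exact PySem.Set.nodup_ofList _

theorem pvFirst_mem_keys (neckl : List String) (c : String) :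
    c ∈ (pvFirst neckl).keys ↔ c ∈ neckl := by
  rw [pvFirst_keys, PySem.Set.mem_ofList, List.mem_reverse]

-- The final value stored for c is its first-occurrence index.
theorem pvGetD_first (xs : List String) (a : Int) (d : PySem.Dict String Int)
    (c : String) (hc : c ∈ xs) :
    ((PySem.List.enumerate xs a).foldr (fun p d => d.insert p.2 p.1) d).getD c 0
      = a + (xs.idxOf c : Int) := by
  induction xs generalizing a d with
  | nil => cases hc
  | cons x xs ih =>
    rw [PySem.List.enumerate_cons]
    simp only [List.foldr_cons]
    rw [PySem.Dict.getD_insert]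
    by_cases h : c = x
    · subst h; simp [List.idxOf_cons_self]
    · have hc' : c ∈ xs := by
        rcases List.mem_cons.mp hc with h' | h'
        · exact absurd h' h
        · exact h'
      rw [if_neg h, ih (a + 1) d hc', List.idxOf_cons_ne _ (fun e => h e.symm)]
      push_cast
      ring

-- ---------- dedup is the strictly-idxOf-increasing ordering of the letters ----------

-- Filter-based nub (used only to give dedup a convenient recursion).
def pvDistinct : List String → List String
  | [] => []
  | c :: tail => c :: pvDistinct (tail.filter (fun x => x ≠ c))
termination_by l => l.length
decreasing_by
  have h := List.length_filter_le (fun x : {x // x ∈ tail} => !decide (↑x = c)) tail.attach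
  simp at h ⊢
  omega

theorem pvDistinct_cons (c : String) (l : List String) :
    pvDistinct (c :: l) = c :: pvDistinct (l.filter (fun x => x ≠ c)) := by
  rw [pvDistinct.eq_def]

theorem pvDistinct_update (xs : List String) (s : PySem.Set String) :
    PySem.Set.update s xs = s ++ pvDistinct (xs.filter (fun x => decide (x ∉ s))) := by
  induction xs generalizing s with
  | nil => simp [PySem.Set.update, pvDistinct]
  | cons c xs ih =>
    by_cases hc : c ∈ s
    · have hs : PySem.Set.add s c = s := by simp [PySem.Set.add, PySem.Set.contains, hc]
      simp only [PySem.Set.update, List.foldl_cons, hs, List.filter_cons, hc,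
        not_true, decide_false]
      exact ih s
    · have hadd : PySem.Set.add s c = s ++ [c] := by
        simp [PySem.Set.add, PySem.Set.contains, hc]
      simp only [PySem.Set.update, List.foldl_cons, hadd, List.filter_cons, hc,
        not_false_iff, decide_true, if_true]
      have hIH := ih (s ++ [c])
      simp only [PySem.Set.update] at hIH
      rw [hIH, pvDistinct_cons]
      have hpred : (xs.filter (fun x => decide (x ∉ s))).filter (fun x => x ≠ c)
          = xs.filter (fun x => decide (x ∉ s ++ [c])) := by
        rw [List.filter_filter]
        apply List.filter_congr
        intro x _
        simp [List.mem_append, not_or, and_comm]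
      rw [hpred]
      simp

theorem pvDistinct_eq_dedup (xs : List String) :
    pvDistinct xs = PySem.List.dedup xs := by
  have h := pvDistinct_update xs []
  simp only [List.nil_append, List.not_mem_nil, not_false_iff, decide_true,
    List.filter_true] at h
  rw [← h]
  simp [PySem.List.dedup_eq_ofList, PySem.Set.ofList_eq_foldl, PySem.Set.update]

theorem pvDedup_cons (c : String) (l : List String) :
    PySem.List.dedup (c :: l) = c :: PySem.List.dedup (l.filter (fun x => x ≠ c)) := by
  rw [← pvDistinct_eq_dedup, ← pvDistinct_eq_dedup, pvDistinct_cons]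

-- Filtering preserves the relative order of first occurrences.
theorem pvIdxOf_filter_lt (l : List String) (p : String → Bool) (a b : String)
    (ha : a ∈ l.filter p) (hb : b ∈ l.filter p)
    (h : (l.filter p).idxOf a < (l.filter p).idxOf b) :
    l.idxOf a < l.idxOf b := by
  induction l with
  | nil => simp at ha
  | cons x l ih =>
    by_cases hx : p x
    · rw [List.filter_cons_of_pos hx] at ha hb h
      by_cases hax : a = x
      · subst hax
        have hba : b ≠ a := by rintro rfl; simp at h
        rw [List.idxOf_cons_self, List.idxOf_cons_ne _ (fun e => hba e.symm)]
        exact Nat.succ_pos _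
      · by_cases hbx : b = x
        · subst hbx
          rw [List.idxOf_cons_self, List.idxOf_cons_ne _ (fun e => hax e.symm)] at h
          cases h
        · have ha' : a ∈ l.filter p := by
            rcases List.mem_cons.mp ha with h' | h'
            · exact absurd h' hax
            · exact h'
          have hb' : b ∈ l.filter p := by
            rcases List.mem_cons.mp hb with h' | h'
            · exact absurd h' hbx
            · exact h'
          rw [List.idxOf_cons_ne _ (fun e => hax e.symm),
            List.idxOf_cons_ne _ (fun e => hbx e.symm)] at h
          rw [List.idxOf_cons_ne _ (fun e => hax e.symm),
            List.idxOf_cons_ne _ (fun e => hbx e.symm)]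
          exact Nat.succ_lt_succ (ih ha' hb' (Nat.lt_of_succ_lt_succ h))
    · rw [List.filter_cons_of_neg hx] at ha hb h
      have hax : a ≠ x := fun e => hx (e ▸ List.of_mem_filter ha)
      have hbx : b ≠ x := fun e => hx (e ▸ List.of_mem_filter hb)
      rw [List.idxOf_cons_ne _ (fun e => hax e.symm),
        List.idxOf_cons_ne _ (fun e => hbx e.symm)]
      exact Nat.succ_lt_succ (ih ha hb h)

theorem pvDedup_pairwise_aux (n : Nat) : ∀ (l : List String), l.length ≤ n →
    (PySem.List.dedup l).Pairwise (fun a b => l.idxOf a < l.idxOf b) := by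
  induction n with
  | zero =>
    intro l hl
    have : l = [] := List.eq_nil_of_length_eq_zero (Nat.le_zero.mp hl)
    subst this
    simp [PySem.List.dedup]
  | succ n ih =>
    intro l hl
    match l with
    | [] => simp [PySem.List.dedup]
    | c :: l =>
      rw [pvDedup_cons]
      refine List.Pairwise.cons ?_ ?_
      · intro b hb
        have hb' : b ∈ l.filter (fun x => x ≠ c) :=
          (PySem.List.mem_dedup _ _).mp hb
        have hbc : b ≠ c := by simpa using List.of_mem_filter hb'
        rw [List.idxOf_cons_self, List.idxOf_cons_ne _ (fun e => hbc e.symm)]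
        exact Nat.succ_pos _
      · have hlen : (l.filter (fun x => x ≠ c)).length ≤ n :=
          le_trans (List.length_filter_le _ _) (Nat.le_of_succ_le_succ hl)
        refine (ih _ hlen).imp_of_mem ?_
        intro a b ha hb hlt
        have ha' : a ∈ l.filter (fun x => x ≠ c) := (PySem.List.mem_dedup _ _).mp ha
        have hb' : b ∈ l.filter (fun x => x ≠ c) := (PySem.List.mem_dedup _ _).mp hb
        have hac : a ≠ c := by simpa using List.of_mem_filter ha'
        have hbc : b ≠ c := by simpa using List.of_mem_filter hb'
        have h1 : l.idxOf a < l.idxOf b := pvIdxOf_filter_lt l _ a b ha' hb' hlt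
        rw [List.idxOf_cons_ne _ (fun e => hac e.symm),
          List.idxOf_cons_ne _ (fun e => hbc e.symm)]
        exact Nat.succ_lt_succ h1

theorem pvDedup_pairwise (l : List String) :
    (PySem.List.dedup l).Pairwise (fun a b => l.idxOf a < l.idxOf b) :=
  pvDedup_pairwise_aux l.length l le_rfl

-- Sorting the recorded letters by first-occurrence index IS first-appearance order.
theorem pvSorted_eq (neckl : List String) :
    PySem.List.sorted (pvFirst neckl).keys (fun c => (pvFirst neckl).getD c 0)
      = PySem.List.dedup neckl := by
  apply PySem.List.sorted_eq_of_perm_of_pairwise_lt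
  · refine (List.perm_ext_iff_of_nodup (PySem.List.nodup_dedup _)
      (pvFirst_keys_nodup neckl)).mpr ?_
    intro a
    rw [PySem.List.mem_dedup, pvFirst_mem_keys]
  · refine (pvDedup_pairwise neckl).imp_of_mem ?_
    intro a b ha hb hlt
    have ha' : a ∈ neckl := (PySem.List.mem_dedup _ _).mp ha
    have hb' : b ∈ neckl := (PySem.List.mem_dedup _ _).mp hb
    rw [pvFirst, pvGetD_first neckl 0 _ a ha', pvGetD_first neckl 0 _ b hb']
    simpa using hlt

-- ===== VERDICT (by name: the statement is the Claim_ definition above) =====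
theorem getTypeIndex_spec : Claim_equal_getTypeIndex := by
  intro neckl _
  show getTypeIndex neckl = getTypeIndex_alt neckl
  -- A side.
  have hempty : pvD [] = PySem.Dict.empty := rfl
  have h := pvMain neckl []
  simp only [hempty] at h
  have hup : PySem.Set.update ([] : PySem.Set String) neckl = PySem.List.dedup neckl := by
    simp [PySem.Set.update, PySem.List.dedup_eq_ofList, PySem.Set.ofList_eq_foldl]
  unfold getTypeIndex
  rw [show ((0 : Int), PySem.Dict.empty)
        = (((([] : PySem.Set String).length : Int)), PySem.Dict.empty) by rfl,
    h, hup]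
  -- B side.
  show (PySem.List.enumerate (PySem.List.dedup neckl) 0).map (fun p => (p.2, p.1))
      = getTypeIndex_alt neckl
  unfold getTypeIndex_alt
  rw [pvLoop_eq]
  show List.map (fun p => (p.2, p.1)) (PySem.List.enumerate (PySem.List.dedup neckl))
      = List.map (fun p => (p.2, p.1)) (PySem.List.enumerate
          (PySem.List.sorted (pvFirst neckl).keys (fun c => (pvFirst neckl).getD c 0)))
  rw [pvSorted_eq]
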